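-- pv_equiv track=rewrite | github.com/developer-1v/uve_ultra_videos_entertainment | simplify_sequences.py | simplify_sequences
-- ===== SOURCE A (Python) =====
-- def simplify_sequences(possible_conflicting_sequences):
--     simplified = {}
--     missing_frames = {}
--
--     for sequence, episodes in possible_conflicting_sequences.items():
--         simplified[sequence] = {}
--         missing_frames[sequence] = {}
--
--         for episode, frames in episodes.items():
--             if frames:
--                 min_frame = min(frames)
--                 max_frame = max(frames)
--                 simplified[sequence][episode] = [min_frame, max_frame]
--
--                 # Check for missing frames within the episode
--                 expected_frames = set(range(min_frame, max_frame + 1))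
--                 actual_frames = set(frames)
--                 missing = expected_frames - actual_frames
--                 if missing:
--                     missing_frames[sequence][episode] = sorted(list(missing))
--
--     return simplified, missing_frames
-- ===== SOURCE B (Python) =====
-- def simplify_sequences(possible_conflicting_sequences):
--     # B: two staged dict comprehensions (one pass for the spans, one for the
--     # missing frames) with a gap-walk over the distinct sorted frames, instead
--     # of A's single nested loop that builds both dicts via expected-set
--     # subtraction.
--     def span(frames):
--         s = sorted(set(frames))
--         return [s[0], s[-1]]
--
--     def gaps(frames):
--         s = sorted(set(frames))
--         return [x for a, b in zip(s, s[1:]) for x in range(a + 1, b)]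
--
--     simplified = {
--         seq: {ep: span(f) for ep, f in eps.items() if f}
--         for seq, eps in possible_conflicting_sequences.items()
--     }
--     missing_frames = {
--         seq: {ep: gaps(f) for ep, f in eps.items() if f and gaps(f)}
--         for seq, eps in possible_conflicting_sequences.items()
--     }
--     return simplified, missing_frames
-- ===== Notes on version B (the rewrite author's own statement) =====
-- stated objective: alternative
-- what changed: B replaces A's single nested loop with expected-set subtraction (set(range(min,max+1)) - set(frames), then sort) by two staged dict comprehensions over the input and a linear gap-walk over the distinct sorted frames that emits the missing ranges already in order.
import Mathlib
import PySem

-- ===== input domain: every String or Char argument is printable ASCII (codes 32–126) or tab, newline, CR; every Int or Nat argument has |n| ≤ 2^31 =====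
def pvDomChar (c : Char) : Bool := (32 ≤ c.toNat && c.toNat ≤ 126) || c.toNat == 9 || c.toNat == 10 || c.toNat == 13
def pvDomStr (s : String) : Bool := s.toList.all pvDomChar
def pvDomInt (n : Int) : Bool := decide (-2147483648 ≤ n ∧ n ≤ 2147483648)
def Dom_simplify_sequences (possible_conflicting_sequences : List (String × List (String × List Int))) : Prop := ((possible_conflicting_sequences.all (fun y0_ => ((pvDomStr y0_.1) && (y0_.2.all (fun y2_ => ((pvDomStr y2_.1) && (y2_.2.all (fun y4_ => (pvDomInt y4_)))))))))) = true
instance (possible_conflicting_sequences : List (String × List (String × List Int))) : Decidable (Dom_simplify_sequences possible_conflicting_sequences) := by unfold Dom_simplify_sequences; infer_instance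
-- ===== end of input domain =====

-- B builds the two result dicts in two staged map/filter passes with a linear gap-walk over the distinct sorted frames, instead of A's nested loop with expected-set subtraction (objective: alternative algorithm).


-- ===== PORT A =====
-- dicts are assoc lists in insertion order; each sequence/episode key is assigned exactly once
-- per loop iteration, so 'simplified[sequence] = …' appends a fresh entry.
def simplify_sequences (possible_conflicting_sequences : List (String × List (String × List Int))) : (List (String × List (String × List Int))) × (List (String × List (String × List Int))) :=
  possible_conflicting_sequences.foldl
    (fun acc p =>
      let ep := p.2.foldl
        (fun (acc2 : List (String × List Int) × List (String × List Int)) (q : String × List Int) =>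
          if q.2 ≠ [] then
            match PySem.List.min? q.2 (fun x => x), PySem.List.max? q.2 (fun x => x) with
            | some min_frame, some max_frame =>
              let simp2 := acc2.1 ++ [(q.1, [min_frame, max_frame])]
              let expected := PySem.Set.ofList (PySem.List.pyRange min_frame (max_frame + 1) 1)
              let actual := PySem.Set.ofList q.2
              let missing := PySem.Set.diff expected actual
              if missing ≠ [] then (simp2, acc2.2 ++ [(q.1, PySem.List.sorted missing (fun x => x) false)])
              else (simp2, acc2.2)
            | _, _ => acc2
          else acc2)
        ([], [])
      (acc.1 ++ [(p.1, ep.1)], acc.2 ++ [(p.1, ep.2)]))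
    ([], [])

-- ===== PORT B =====
-- span(frames) = [s[0], s[-1]] of the distinct sorted frames
def spanB (frames : List Int) : List Int :=
  let s := PySem.List.sorted (PySem.Set.ofList frames) (fun x => x) false
  [PySem.List.pyGetD s 0 0, PySem.List.pyGetD s (-1) 0]

-- gaps(frames): flatten range(a+1, b) over adjacent pairs of the distinct sorted frames
def gapsB (frames : List Int) : List Int :=
  ((PySem.List.sorted (PySem.Set.ofList frames) (fun x => x) false).zip
      (PySem.List.slice (PySem.List.sorted (PySem.Set.ofList frames) (fun x => x) false) (some 1) none)).flatMap
    (fun ab => PySem.List.pyRange (ab.1 + 1) ab.2 1)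

def simplify_sequences_alt (possible_conflicting_sequences : List (String × List (String × List Int))) : (List (String × List (String × List Int))) × (List (String × List (String × List Int))) :=
  (possible_conflicting_sequences.map (fun p =>
      (p.1, p.2.filterMap (fun q => if q.2 ≠ [] then some (q.1, spanB q.2) else none))),
   possible_conflicting_sequences.map (fun p =>
      (p.1, p.2.filterMap (fun q => if q.2 ≠ [] ∧ gapsB q.2 ≠ [] then some (q.1, gapsB q.2) else none))))

-- ===== PRECONDITION & SPEC =====
def Spec_simplify_sequences (possible_conflicting_sequences : List (String × List (String × List Int))) (out : (List (String × List (String × List Int))) × (List (String × List (String × List Int)))) : Prop := out = simplify_sequences_alt possible_conflicting_sequences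
instance (possible_conflicting_sequences : List (String × List (String × List Int))) (out : (List (String × List (String × List Int))) × (List (String × List (String × List Int)))) : Decidable (Spec_simplify_sequences possible_conflicting_sequences out) := by unfold Spec_simplify_sequences; exact @instDecidableEqProd _ _ (by infer_instance) (by infer_instance) _ _

-- ===== CLAIM (what is proved, stated in full; the proofs are below) =====
def Claim_equal_simplify_sequences : Prop := ∀ (possible_conflicting_sequences : List (String × List (String × List Int))), Dom_simplify_sequences possible_conflicting_sequences → Spec_simplify_sequences possible_conflicting_sequences (simplify_sequences possible_conflicting_sequences)

-- ===== LEMMAS AND PROOFS =====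

-- in a strictly increasing list, getLast is an upper bound
lemma pw_le_getLast : ∀ (r : List Int) (x : Int), (x :: r).Pairwise (· < ·) →
    ∀ y ∈ x :: r, y ≤ (x :: r).getLast (List.cons_ne_nil x r) := by
  intro r
  induction r with
  | nil => intro x _ y hy; simp_all
  | cons z t ih =>
    intro x hp y hy
    have hp' : (z :: t).Pairwise (· < ·) := hp.of_cons
    have hxz : x < z := (List.pairwise_cons.mp hp).1 z (by simp)
    rw [List.getLast_cons (List.cons_ne_nil z t)]
    rcases List.mem_cons.mp hy with h | h
    · subst h
      exact le_trans (le_of_lt hxz) (ih z hp' z (by simp))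
    · exact ih z hp' y h

-- the gap-walk over a strictly increasing list is the complement of the list inside [head, last]
lemma gap_main : ∀ (r : List Int) (x : Int), (x :: r).Pairwise (· < ·) →
    (PySem.List.pyRange x ((x :: r).getLast (List.cons_ne_nil x r) + 1) 1).filter
        (fun a => !decide (a ∈ x :: r))
      = ((x :: r).zip r).flatMap (fun pc => PySem.List.pyRange (pc.1 + 1) pc.2 1) := by
  intro r
  induction r with
  | nil =>
    intro x _
    simp [PySem.List.pyRange_one_singleton]
  | cons z t ih =>
    intro x hp
    have hp' : (z :: t).Pairwise (· < ·) := hp.of_cons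
    have hxz : x < z := (List.pairwise_cons.mp hp).1 z (by simp)
    have hzt : ∀ b ∈ t, z < b := (List.pairwise_cons.mp hp').1
    have hL : z ≤ (z :: t).getLast (List.cons_ne_nil z t) := pw_le_getLast t z hp' z (by simp)
    have hgl : (x :: z :: t).getLast (List.cons_ne_nil x (z :: t)) = (z :: t).getLast (List.cons_ne_nil z t) :=
      List.getLast_cons (List.cons_ne_nil z t)
    rw [hgl, PySem.List.pyRange_one_append x z ((z :: t).getLast (List.cons_ne_nil z t) + 1)
        (le_of_lt hxz) (by omega), List.filter_append]
    have h1 : (PySem.List.pyRange x z 1).filter (fun a => !decide (a ∈ x :: z :: t))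
        = PySem.List.pyRange (x + 1) z 1 := by
      rw [PySem.List.pyRange_one_cons hxz]
      rw [List.filter_cons]
      rw [if_neg (by simp)]
      apply List.filter_eq_self.mpr
      intro a ha
      have hab := (PySem.List.mem_pyRange_one).mp ha
      have hna : a ∉ x :: z :: t := by
        simp only [List.mem_cons]
        rintro (h | h | h)
        · omega
        · omega
        · exact absurd (hzt a h) (by omega)
      simp [hna]
    have h2 : (PySem.List.pyRange z ((z :: t).getLast (List.cons_ne_nil z t) + 1) 1).filter
          (fun a => !decide (a ∈ x :: z :: t))
        = ((z :: t).zip t).flatMap (fun pc => PySem.List.pyRange (pc.1 + 1) pc.2 1) := by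
      rw [List.filter_congr (fun a ha => ?_), ih z hp']
      have hab := (PySem.List.mem_pyRange_one).mp ha
      simp only [List.mem_cons]
      have : a ≠ x := by omega
      simp [this]
    rw [h1, h2]
    simp [List.zip]

-- negative index -1 reads the last element
lemma pyGetD_neg_one_eq_getLast (l : List Int) (h : l ≠ []) : PySem.List.pyGetD l (-1) 0 = l.getLast h := by
  have hl : 1 ≤ l.length := List.length_pos_iff.mpr h
  simp [PySem.List.pyGetD, PySem.List.pyGet?, PySem.List.pyIdx?, hl,
    List.getElem?_eq_getElem (by omega : l.length - 1 < l.length), List.getLast_eq_getElem]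

-- sorted(set(frames)) of a nonempty frames list is nonempty
lemma sorted_ofList_ne_nil (q2 : List Int) (h : q2 ≠ []) :
    PySem.List.sorted (PySem.Set.ofList q2) (fun x => x) false ≠ [] := by
  rw [Ne, PySem.List.sorted_eq_nil_iff]
  intro hof
  obtain ⟨a, t, rfl⟩ := List.exists_cons_of_ne_nil h
  have : a ∈ PySem.Set.ofList (a :: t) := (PySem.Set.mem_ofList _ a).mpr (by simp)
  simp [hof] at this

-- membership in sorted(set(q2)) is membership in q2
lemma mem_sorted_ofList (q2 : List Int) (a : Int) :
    a ∈ PySem.List.sorted (PySem.Set.ofList q2) (fun x => x) false ↔ a ∈ q2 := by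
  rw [PySem.List.mem_sorted, PySem.Set.mem_ofList]

-- min(frames) is the head of sorted(set(frames))
lemma min_eq_head (q2 : List Int) (mn x : Int) (r : List Int)
    (hs : PySem.List.sorted (PySem.Set.ofList q2) (fun x => x) false = x :: r)
    (hmn : PySem.List.min? q2 (fun x => x) = some mn) : mn = x := by
  have h1 : mn ∈ q2 := PySem.List.min?_mem hmn
  have h2 : ∀ y ∈ q2, mn ≤ y := fun y hy => PySem.List.min?_isMin hmn y hy
  have hpw := PySem.List.sorted_ofList_pairwise_lt q2
  rw [hs] at hpw
  have hx : x ∈ q2 := (mem_sorted_ofList q2 x).mp (by rw [hs]; simp)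
  have hmns : mn ∈ x :: r := by rw [← hs, mem_sorted_ofList]; exact h1
  have hlb : ∀ y ∈ x :: r, x ≤ y := by
    intro y hy
    rcases List.mem_cons.mp hy with h | h
    · omega
    · exact le_of_lt ((List.pairwise_cons.mp hpw).1 y h)
  exact le_antisymm (h2 x hx) (hlb mn hmns)

-- max(frames) is the last element of sorted(set(frames))
lemma max_eq_getLast (q2 : List Int) (mx x : Int) (r : List Int)
    (hs : PySem.List.sorted (PySem.Set.ofList q2) (fun x => x) false = x :: r)
    (hmx : PySem.List.max? q2 (fun x => x) = some mx) : mx = (x :: r).getLast (List.cons_ne_nil x r) := by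
  have h1 : mx ∈ q2 := PySem.List.max?_mem hmx
  have h2 : ∀ y ∈ q2, y ≤ mx := fun y hy => PySem.List.max?_isMax hmx y hy
  have hpw := PySem.List.sorted_ofList_pairwise_lt q2
  rw [hs] at hpw
  have hlast : (x :: r).getLast (List.cons_ne_nil x r) ∈ q2 := by
    rw [← mem_sorted_ofList q2, hs]; exact List.getLast_mem _
  have hmxs : mx ∈ x :: r := by rw [← hs, mem_sorted_ofList]; exact h1
  exact le_antisymm (pw_le_getLast r x hpw mx hmxs) (h2 _ hlast)

-- for nonempty frames, A's per-episode values coincide with B's span/gaps values: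
-- [min, max] = spanB, the missing set equals gapsB, and sorting it is the identity
lemma episode_values (q2 : List Int) (hq : q2 ≠ []) (mn mx : Int)
    (hmn : PySem.List.min? q2 (fun x => x) = some mn)
    (hmx : PySem.List.max? q2 (fun x => x) = some mx) :
    [mn, mx] = spanB q2 ∧
    PySem.Set.diff (PySem.Set.ofList (PySem.List.pyRange mn (mx + 1) 1)) (PySem.Set.ofList q2) = gapsB q2 ∧
    PySem.List.sorted (gapsB q2) (fun x => x) false = gapsB q2 := by
  obtain ⟨x, r, hs⟩ := List.exists_cons_of_ne_nil (sorted_ofList_ne_nil q2 hq)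
  have hpw := PySem.List.sorted_ofList_pairwise_lt q2
  rw [hs] at hpw
  have hmn' := min_eq_head q2 mn x r hs hmn
  have hmx' := max_eq_getLast q2 mx x r hs hmx
  have hgaps : gapsB q2 = ((x :: r).zip r).flatMap (fun pc => PySem.List.pyRange (pc.1 + 1) pc.2 1) := by
    unfold gapsB
    rw [PySem.List.slice_from_one, hs]
    simp [List.zip]
  have hspan : spanB q2 = [x, (x :: r).getLast (List.cons_ne_nil x r)] := by
    unfold spanB
    have hhead : PySem.List.pyGetD (PySem.List.sorted (PySem.Set.ofList q2) (fun x => x) false) 0 0 = x := by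
      rw [hs]; simp [PySem.List.pyGetD, PySem.List.pyGet?, PySem.List.pyIdx?]
    have hlast : PySem.List.pyGetD (PySem.List.sorted (PySem.Set.ofList q2) (fun x => x) false) (-1) 0
        = (x :: r).getLast (List.cons_ne_nil x r) := by
      rw [pyGetD_neg_one_eq_getLast _ (sorted_ofList_ne_nil q2 hq)]
      exact List.getLast_congr _ _ hs
    simp [hhead, hlast]
  have hmiss : PySem.Set.diff (PySem.Set.ofList (PySem.List.pyRange mn (mx + 1) 1)) (PySem.Set.ofList q2)
      = ((x :: r).zip r).flatMap (fun pc => PySem.List.pyRange (pc.1 + 1) pc.2 1) := by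
    rw [hmn', hmx']
    rw [PySem.Set.ofList_eq_self_of_nodup _ (PySem.List.nodup_pyRange_one x ((x :: r).getLast (List.cons_ne_nil x r) + 1))]
    have hdiff : PySem.Set.diff (PySem.List.pyRange x ((x :: r).getLast (List.cons_ne_nil x r) + 1) 1) (PySem.Set.ofList q2)
        = (PySem.List.pyRange x ((x :: r).getLast (List.cons_ne_nil x r) + 1) 1).filter
            (fun a => !decide (a ∈ x :: r)) := by
      simp only [PySem.Set.diff, PySem.Set.contains]
      apply List.filter_congr
      intro a _
      have : a ∈ PySem.Set.ofList q2 ↔ a ∈ x :: r := by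
        rw [PySem.Set.mem_ofList _ a, ← mem_sorted_ofList q2 a, hs]
      simp [this]
    rw [hdiff, gap_main r x hpw]
  have hmiss_pw : (((x :: r).zip r).flatMap (fun pc => PySem.List.pyRange (pc.1 + 1) pc.2 1)).Pairwise (· ≤ ·) := by
    rw [← hmiss]
    have : (PySem.Set.diff (PySem.Set.ofList (PySem.List.pyRange mn (mx + 1) 1)) (PySem.Set.ofList q2)).Sublist
        (PySem.Set.ofList (PySem.List.pyRange mn (mx + 1) 1)) := by
      simp only [PySem.Set.diff]
      exact List.filter_sublist
    refine List.Pairwise.imp le_of_lt (List.Pairwise.sublist this ?_)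
    rw [PySem.Set.ofList_eq_self_of_nodup _ (PySem.List.nodup_pyRange_one mn (mx + 1))]
    exact PySem.List.pairwise_lt_pyRange_one mn (mx + 1)
  refine ⟨by rw [hspan, hmn', hmx'], by rw [hmiss, hgaps], ?_⟩
  rw [hgaps]
  exact PySem.List.sorted_eq_self_of_pairwise _ _ hmiss_pw

-- A's inner loop body appends exactly B's two per-episode entries
lemma step_eq (acc2 : List (String × List Int) × List (String × List Int)) (q : String × List Int) :
    (if q.2 ≠ [] then
        match PySem.List.min? q.2 (fun x => x), PySem.List.max? q.2 (fun x => x) with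
        | some min_frame, some max_frame =>
          let simp2 := acc2.1 ++ [(q.1, [min_frame, max_frame])]
          let expected := PySem.Set.ofList (PySem.List.pyRange min_frame (max_frame + 1) 1)
          let actual := PySem.Set.ofList q.2
          let missing := PySem.Set.diff expected actual
          if missing ≠ [] then (simp2, acc2.2 ++ [(q.1, PySem.List.sorted missing (fun x => x) false)])
          else (simp2, acc2.2)
        | _, _ => acc2
      else acc2)
    = (acc2.1 ++ ((if q.2 ≠ [] then some (q.1, spanB q.2) else none) : Option (String × List Int)).toList,
       acc2.2 ++ ((if q.2 ≠ [] ∧ gapsB q.2 ≠ [] then some (q.1, gapsB q.2) else none) : Option (String × List Int)).toList) := by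
  by_cases hq : q.2 = []
  · simp [hq]
  · obtain ⟨mn, hmn⟩ : ∃ mn, PySem.List.min? q.2 (fun x => x) = some mn := by
      cases hm : PySem.List.min? q.2 (fun x => x) with
      | none => exact absurd ((PySem.List.min?_eq_none_iff q.2 (fun x => x)).mp hm) hq
      | some v => exact ⟨v, rfl⟩
    obtain ⟨mx, hmx⟩ : ∃ mx, PySem.List.max? q.2 (fun x => x) = some mx := by
      cases hm : PySem.List.max? q.2 (fun x => x) with
      | none => exact absurd ((PySem.List.max?_eq_none_iff q.2 (fun x => x)).mp hm) hq
      | some v => exact ⟨v, rfl⟩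
    obtain ⟨hspan, hmiss, hsort⟩ := episode_values q.2 hq mn mx hmn hmx
    rw [if_pos hq, hmn, hmx]
    simp only [hmiss, hsort, hspan, hq, ne_eq, not_false_iff, true_and, if_true]
    by_cases hg : gapsB q.2 = []
    · simp [hg]
    · simp [hg]

-- A's inner fold accumulates exactly B's two filterMap passes over the episodes
lemma inner_eq (eps : List (String × List Int)) :
    ∀ acc2 : List (String × List Int) × List (String × List Int),
    eps.foldl
      (fun (acc2 : List (String × List Int) × List (String × List Int)) (q : String × List Int) =>
          if q.2 ≠ [] then
            match PySem.List.min? q.2 (fun x => x), PySem.List.max? q.2 (fun x => x) with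
            | some min_frame, some max_frame =>
              let simp2 := acc2.1 ++ [(q.1, [min_frame, max_frame])]
              let expected := PySem.Set.ofList (PySem.List.pyRange min_frame (max_frame + 1) 1)
              let actual := PySem.Set.ofList q.2
              let missing := PySem.Set.diff expected actual
              if missing ≠ [] then (simp2, acc2.2 ++ [(q.1, PySem.List.sorted missing (fun x => x) false)])
              else (simp2, acc2.2)
            | _, _ => acc2
          else acc2)
      acc2
    = (acc2.1 ++ eps.filterMap (fun q => if q.2 ≠ [] then some (q.1, spanB q.2) else none),
       acc2.2 ++ eps.filterMap (fun q => if q.2 ≠ [] ∧ gapsB q.2 ≠ [] then some (q.1, gapsB q.2) else none)) := by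
  induction eps with
  | nil => intro acc2; simp
  | cons q t ih =>
    intro acc2
    rw [List.foldl_cons, step_eq acc2 q, ih]
    by_cases hq : q.2 = [] <;> by_cases hg : gapsB q.2 = [] <;>
      simp [hq, hg, List.append_assoc]

-- ===== VERDICT (by name: the statement is the Claim_ definition above) =====
theorem simplify_sequences_spec : Claim_equal_simplify_sequences := by
  intro pcs hdom
  clear hdom
  unfold Spec_simplify_sequences simplify_sequences simplify_sequences_alt
  induction pcs using List.reverseRecOn with
  | nil => rfl
  | append_singleton t p ih =>
    rw [List.foldl_append, List.foldl_cons, List.foldl_nil, ih]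
    rw [inner_eq p.2 ([], [])]
    simp
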